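-- pv_equiv track=rewrite | github.com/im-DataEngineer/genUT | llmCall.py | extract_python_code
-- ===== SOURCE A (Python) =====
-- def extract_python_code(response_content):
--     """
--     Extracts Python code block from the response content.
--
--     Args:
--         response_content (str): The content of the response from OpenAI.
--
--     Returns:
--         str: The extracted Python code block.
--     """
--     # Split the content by newlines
--     lines = response_content.split('\n')
--
--     # Initialize lists to store import statements, class/function definitions, and other code lines
--     import_statements = []
--     class_function_code = []
--
--     # Flags to indicate whether we are inside a class or function definition
--     inside_class = False
--     inside_function = False
--
--     # Iterate over each line in the response content
--     for line in lines:
--         # Check if the line starts with 'import' or 'from'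
--         if line.startswith(('import', 'from')):
--             import_statements.append(line)
--         # Check if the line starts with 'class'
--         elif line.startswith('class'):
--             class_function_code.append(line)
--             inside_class = True
--         # Check if the line starts with 'def'
--         elif line.startswith('def'):
--             class_function_code.append(line)
--             inside_function = True
--         # Add lines inside class/function definitions
--         elif inside_class or inside_function:
--             class_function_code.append(line)
--         # Break if we encounter another 'class' or 'def' line
--         elif inside_class or inside_function:
--             break
--
--     # Join the import statements, class/function definitions, and other code lines to form the Python code block
--     python_code = '\n'.join(import_statements + class_function_code)
--
--     python_code = python_code.strip().replace('```', '')
--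
--     return python_code
-- ===== SOURCE B (Python) =====
-- def extract_python_code(response_content):
--     lines = response_content.split('\n')
--     imports = [l for l in lines if l.startswith(('import', 'from'))]
--     start = next((i for i, l in enumerate(lines)
--                   if l.startswith(('class', 'def'))), None)
--     body = [] if start is None else [l for l in lines[start:]
--                                      if not l.startswith(('import', 'from'))]
--     return '\n'.join(imports + body).strip().replace('```', '')
-- ===== Notes on version B (the rewrite author's own statement) =====
-- stated objective: simpler
-- what changed: Replaces A's single stateful classify loop with inside_class/inside_function flag variables by a boundary search (index of the first line starting with 'class'/'def') plus two stateless filter passes: hoisted imports, and the non-import lines from the boundary onward.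
import Mathlib
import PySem

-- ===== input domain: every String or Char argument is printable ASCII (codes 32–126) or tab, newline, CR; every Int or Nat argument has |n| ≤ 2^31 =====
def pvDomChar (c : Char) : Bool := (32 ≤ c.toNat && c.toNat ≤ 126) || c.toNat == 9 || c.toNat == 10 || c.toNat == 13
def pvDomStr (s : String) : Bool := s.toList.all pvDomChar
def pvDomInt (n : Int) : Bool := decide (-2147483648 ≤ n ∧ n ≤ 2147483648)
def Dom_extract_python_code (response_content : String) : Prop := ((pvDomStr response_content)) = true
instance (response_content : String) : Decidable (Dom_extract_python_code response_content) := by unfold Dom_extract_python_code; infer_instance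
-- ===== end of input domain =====

-- B: one sentence — replaces A's stateful classify loop (flag variables) by a boundary
-- search (index of the first 'class'/'def' line) plus two filter passes; objective: simpler.

-- shared helpers: the two startswith tests both Pythons perform
-- line.startswith(('import', 'from'))
def isImp (l : List Char) : Bool :=
  PySem.Chars.startswith l "import".toList || PySem.Chars.startswith l "from".toList
-- line.startswith(('class', 'def'))  (A tests the two separately; the test is the same)
def isCD (l : List Char) : Bool :=
  PySem.Chars.startswith l "class".toList || PySem.Chars.startswith l "def".toList

-- ===== PORT A =====
-- loop body of A: state = (import_statements, class_function_code, inside_class, inside_function)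
-- (A's final 'elif inside_class or inside_function: break' is unreachable — same condition as
-- the previous elif — so it has no counterpart here, exactly as in the Python.)
def stepA (st : List (List Char) × List (List Char) × Bool × Bool) (line : List Char) :
    List (List Char) × List (List Char) × Bool × Bool :=
  if isImp line then (st.1 ++ [line], st.2.1, st.2.2.1, st.2.2.2)
  else if PySem.Chars.startswith line "class".toList then (st.1, st.2.1 ++ [line], true, st.2.2.2)
  else if PySem.Chars.startswith line "def".toList then (st.1, st.2.1 ++ [line], st.2.2.1, true)
  else if st.2.2.1 || st.2.2.2 then (st.1, st.2.1 ++ [line], st.2.2.1, st.2.2.2)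
  else st

def extract_python_code (response_content : String) : String :=
  let lines := PySem.Chars.splitOn response_content.toList "\n".toList
  let st := lines.foldl stepA ([], [], false, false)
  String.ofList (PySem.Chars.replace
    (PySem.Chars.strip (PySem.Chars.join "\n".toList (st.1 ++ st.2.1))) "```".toList [])

-- ===== PORT B =====
-- body of Source B: 'start = next((i for i, l in enumerate(lines) if l.startswith(("class","def"))), None)'
-- then '[] if start is None else [l for l in lines[start:] if not l.startswith(("import","from"))]'
def pyBody (lines : List (List Char)) : List (List Char) :=
  match lines.findIdx? isCD with
  | none => []
  | some i => (lines.drop i).filter (fun l => !isImp l)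

def extract_python_code_alt (response_content : String) : String :=
  let lines := PySem.Chars.splitOn response_content.toList "\n".toList
  let imports := lines.filter isImp
  String.ofList (PySem.Chars.replace
    (PySem.Chars.strip (PySem.Chars.join "\n".toList (imports ++ pyBody lines))) "```".toList [])

-- ===== PRECONDITION & SPEC =====
def Spec_extract_python_code (response_content : String) (out : String) : Prop := out = extract_python_code_alt response_content
instance (response_content : String) (out : String) : Decidable (Spec_extract_python_code response_content out) := by unfold Spec_extract_python_code; infer_instance

-- ===== CLAIM (what is proved, stated in full; the proofs are below) =====
def Claim_equal_extract_python_code : Prop := ∀ (response_content : String), Dom_extract_python_code response_content → Spec_extract_python_code response_content (extract_python_code response_content)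

-- ===== LEMMAS AND PROOFS =====

-- a true startswith pins down the first character of the line
lemma head_of_sw (s p : List Char) (h : PySem.Chars.startswith s p = true) :
    p = [] ∨ s.head? = p.head? := by
  rw [PySem.Chars.startswith_iff] at h
  obtain ⟨t, ht⟩ := h
  cases hp : p with
  | nil => exact Or.inl rfl
  | cons a as => right; rw [← ht, hp]; simp

-- import/from lines and class/def lines are disjoint (first characters differ)
lemma imp_not_cd (l : List Char) (h : isImp l = true) : isCD l = false := by
  have hh : l.head? = some 'i' ∨ l.head? = some 'f' := by
    rcases Bool.or_eq_true_iff.mp h with h' | h'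
    · rcases head_of_sw l "import".toList h' with hp | hp
      · simp at hp
      · exact Or.inl hp
    · rcases head_of_sw l "from".toList h' with hp | hp
      · simp at hp
      · exact Or.inr hp
  by_contra hne
  have hcd : isCD l = true := by cases hb : isCD l <;> simp_all
  have hh2 : l.head? = some 'c' ∨ l.head? = some 'd' := by
    rcases Bool.or_eq_true_iff.mp hcd with h' | h'
    · rcases head_of_sw l "class".toList h' with hp | hp
      · simp at hp
      · exact Or.inl hp
    · rcases head_of_sw l "def".toList h' with hp | hp
      · simp at hp
      · exact Or.inr hp
  rcases hh with hh | hh <;> rcases hh2 with hh2 | hh2 <;> simp_all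

lemma pyBody_cons_neg (l : List Char) (rest : List (List Char)) (h : isCD l = false) :
    pyBody (l :: rest) = pyBody rest := by
  unfold pyBody
  rw [List.findIdx?_cons]
  simp only [h, if_neg Bool.false_ne_true]
  cases rest.findIdx? isCD <;> simp

lemma pyBody_cons_pos (l : List Char) (rest : List (List Char)) (h : isCD l = true)
    (hi : isImp l = false) :
    pyBody (l :: rest) = l :: rest.filter (fun l => !isImp l) := by
  unfold pyBody
  rw [List.findIdx?_cons]
  simp [h, hi]

-- once a flag is set, A appends every subsequent non-import line to class_function_code
lemma loopA_true (rest : List (List Char)) : ∀ (imp cfc : List (List Char)) (ic ifn : Bool),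
    (ic || ifn) = true →
    (rest.foldl stepA (imp, cfc, ic, ifn)).1 = imp ++ rest.filter isImp ∧
    (rest.foldl stepA (imp, cfc, ic, ifn)).2.1 = cfc ++ rest.filter (fun l => !isImp l) := by
  induction rest with
  | nil => intro imp cfc ic ifn _; simp
  | cons l rest ih =>
    intro imp cfc ic ifn hflag
    by_cases hi : isImp l = true
    · have := ih (imp ++ [l]) cfc ic ifn hflag
      simp only [List.foldl_cons, stepA, hi, if_pos]
      simp [this.1, this.2, hi]
    · have hi' : isImp l = false := by simp_all
      by_cases hc : PySem.Chars.startswith l "class".toList = true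
      · have := ih imp (cfc ++ [l]) true ifn (by simp)
        simp only [List.foldl_cons, stepA, hi', Bool.false_eq_true, hc, if_pos]
        simp [this.1, this.2, hi']
      · by_cases hd : PySem.Chars.startswith l "def".toList = true
        · have := ih imp (cfc ++ [l]) ic true (by simp)
          simp only [List.foldl_cons, stepA, hi', Bool.false_eq_true, hc, hd, if_pos]
          simp [this.1, this.2, hi']
        · have := ih imp (cfc ++ [l]) ic ifn hflag
          simp only [List.foldl_cons, stepA, hi', Bool.false_eq_true, hc, hd, hflag,
            if_pos]
          simp [this.1, this.2, hi']

-- before any flag is set, A hoists imports and starts the body at the first class/def line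
lemma loopA_false (rest : List (List Char)) : ∀ (imp cfc : List (List Char)),
    (rest.foldl stepA (imp, cfc, false, false)).1 = imp ++ rest.filter isImp ∧
    (rest.foldl stepA (imp, cfc, false, false)).2.1 = cfc ++ pyBody rest := by
  induction rest with
  | nil => intro imp cfc; simp [pyBody]
  | cons l rest ih =>
    intro imp cfc
    by_cases hi : isImp l = true
    · have hcd := imp_not_cd l hi
      have := ih (imp ++ [l]) cfc
      simp only [List.foldl_cons, stepA, hi, if_pos]
      rw [pyBody_cons_neg l rest hcd] at *
      simp [this.1, this.2, hi]
    · have hi' : isImp l = false := by simp_all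
      by_cases hc : PySem.Chars.startswith l "class".toList = true
      · have hcd : isCD l = true := by unfold isCD; rw [hc]; simp
        have := loopA_true rest imp (cfc ++ [l]) true false (by simp)
        simp only [List.foldl_cons, stepA, hi', Bool.false_eq_true, hc, if_pos]
        rw [pyBody_cons_pos l rest hcd hi']
        simp [this.1, this.2, hi']
      · by_cases hd : PySem.Chars.startswith l "def".toList = true
        · have hcd : isCD l = true := by unfold isCD; rw [hd]; simp
          have := loopA_true rest imp (cfc ++ [l]) false true (by simp)
          simp only [List.foldl_cons, stepA, hi', Bool.false_eq_true, hc, hd, if_pos]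
          rw [pyBody_cons_pos l rest hcd hi']
          simp [this.1, this.2, hi']
        · have hcd : isCD l = false := by
            unfold isCD
            simp only [Bool.not_eq_true] at hc hd
            rw [hc, hd]; rfl
          have := ih imp cfc
          simp only [List.foldl_cons, stepA, hi', Bool.false_eq_true, hc, hd,
            Bool.or_self]
          rw [pyBody_cons_neg l rest hcd]
          simp [this.1, this.2, hi']

lemma ext_eq (rc : String) : extract_python_code rc = extract_python_code_alt rc := by
  unfold extract_python_code extract_python_code_alt
  obtain ⟨h1, h2⟩ := loopA_false (PySem.Chars.splitOn rc.toList "\n".toList) [] []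
  simp only [h1, h2, List.nil_append]

-- ===== VERDICT (by name: the statement is the Claim_ definition above) =====
theorem extract_python_code_spec : Claim_equal_extract_python_code := by
  intro rc _
  unfold Spec_extract_python_code
  exact ext_eq rc
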